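-- pv_equiv track=rewrite | github.com/alexjercan/metazooa | metazooa.py | best_leaf_guess
-- ===== SOURCE A (Python) =====
-- from collections import defaultdict, deque
-- from typing import List, Tuple, Dict, Set, Optional, Any
--
-- def is_leaf(graph: Dict[str, List[str]], node: str) -> bool:
--     return len(graph[node]) == 0
--
-- def build_parent_map(tree: Dict[str, List[str]]) -> Dict[str, str]:
--     parent = {}
--     for p, children in tree.items():
--         for c in children:
--             parent[c] = p
--     return parent
--
-- def lca(tree: Dict[str, List[str]], a: str, b: str) -> str:
--     parent = build_parent_map(tree)
--
--     ancestors = set()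
--     x = a
--     while x in parent:
--         ancestors.add(x)
--         x = parent[x]
--     ancestors.add(x)  # root
--
--     y = b
--     while y not in ancestors:
--         y = parent[y]
--
--     return y
--
-- def best_leaf_guess(tree: Dict[str, List[str]]) -> Optional[str]:
--     candidates = [node for node in tree.keys() if is_leaf(tree, node)]
--
--     best_guess = None
--     best_worst_case = float("inf")
--
--     for guess in candidates:
--         buckets: Dict[str, int] = defaultdict(int)
--
--         for leaf in candidates:
--             clade = lca(tree, guess, leaf)
--             buckets[clade] += 1
--
--             if buckets[clade] >= best_worst_case:
--                 break
--
--         worst_case = max(buckets.values())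
--         if worst_case < best_worst_case:
--             best_worst_case = worst_case
--             best_guess = guess
--
--     return best_guess
-- ===== SOURCE B (Python) =====
-- from typing import List, Dict, Optional
--
--
-- def best_leaf_guess(tree: Dict[str, List[str]]) -> Optional[str]:
--     # Build the parent map once; walk each leaf's ancestor chain once while
--     # counting, per node, how many leaves lie in its subtree; then the worst
--     # LCA-bucket size of a guess is read off its own chain by count differences.
--     parent = {c: p for p, cs in tree.items() for c in cs}
--     candidates = [n for n, cs in tree.items() if not cs]
--
--     cnt: Dict[str, int] = {}           # node -> number of leaves in its subtree
--     chains: Dict[str, List[str]] = {}  # leaf -> [leaf, parent, ..., root]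
--     for leaf in candidates:
--         chain = [leaf]
--         while chain[-1] in parent:
--             chain.append(parent[chain[-1]])
--         chains[leaf] = chain
--         for node in chain:
--             cnt[node] = cnt.get(node, 0) + 1
--
--     best_guess = None
--     best_worst_case = None
--     for guess in candidates:
--         chain = chains[guess]
--         worst_case = 1  # the guess itself is alone in its bucket
--         for below, anc in zip(chain, chain[1:]):
--             worst_case = max(worst_case, cnt[anc] - cnt[below])
--         if best_worst_case is None or worst_case < best_worst_case:
--             best_worst_case = worst_case
--             best_guess = guess
--
--     return best_guess
-- ===== Notes on version B (the rewrite author's own statement) =====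
-- stated objective: alternative
-- what changed: B builds the parent map once, walks each leaf's ancestor chain once to accumulate per-node subtree-leaf counts, and reads each guess's worst LCA-bucket size off count differences along its own ancestor chain; A instead runs lca per (guess, leaf) pair and rebuilds the whole parent map inside every lca call.
import Mathlib
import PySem

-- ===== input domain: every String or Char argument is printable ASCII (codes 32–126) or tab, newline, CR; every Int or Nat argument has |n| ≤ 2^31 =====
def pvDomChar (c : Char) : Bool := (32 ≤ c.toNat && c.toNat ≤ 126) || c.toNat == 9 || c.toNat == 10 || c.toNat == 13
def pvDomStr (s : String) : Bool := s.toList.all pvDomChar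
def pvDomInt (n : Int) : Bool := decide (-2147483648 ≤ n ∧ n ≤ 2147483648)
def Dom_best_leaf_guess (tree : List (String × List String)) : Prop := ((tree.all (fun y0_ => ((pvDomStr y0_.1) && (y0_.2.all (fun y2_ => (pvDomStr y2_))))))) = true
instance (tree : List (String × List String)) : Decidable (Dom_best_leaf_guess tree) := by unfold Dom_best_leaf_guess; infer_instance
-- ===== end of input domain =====

-- B replaces A's per-pair LCA search (which rebuilds the parent map inside every lca call) by one
-- parent map, one ancestor chain per leaf with subtree-leaf counts, and a per-guess walk up its
-- own chain reading bucket sizes off count differences (objective: alternative algorithm).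

-- ===== PORT A =====
-- is_leaf(graph, node): len(graph[node]) == 0 (graph[node] cannot raise: only called on keys)
def pvIsLeaf (graph : List (String × List String)) (node : String) : Bool :=
  ((graph.lookup node).getD []).isEmpty

-- build_parent_map(tree)
def pvBuildParentMap (tree : List (String × List String)) : PySem.Dict String String :=
  tree.foldl (fun parent pc => pc.2.foldl (fun par c => par.insert c pc.1) parent) PySem.Dict.empty

-- 'while x in parent: ancestors.add(x); x = parent[x]' then 'ancestors.add(x)'; fuel-bounded
-- (fuel tree.length+1 is never exhausted on inputs satisfying Pre_, where the walk terminates)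
def pvLcaClimb : Nat → PySem.Dict String String → PySem.Set String → String → PySem.Set String
  | 0, _, anc, x => PySem.Set.add anc x
  | f+1, parent, anc, x =>
    match parent.get? x with
    | some p => pvLcaClimb f parent (PySem.Set.add anc x) p
    | none => PySem.Set.add anc x

-- 'while y not in ancestors: y = parent[y]' (parent[y] raises KeyError outside Pre_; the
-- total port reads getD y y there, and Pre_ excludes those inputs)
def pvLcaFind : Nat → PySem.Dict String String → PySem.Set String → String → String
  | 0, _, _, y => y
  | f+1, parent, anc, y =>
    if PySem.Set.contains anc y then y else pvLcaFind f parent anc (parent.getD y y)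

-- lca(tree, a, b)
def pvLca (tree : List (String × List String)) (a b : String) : String :=
  let parent := pvBuildParentMap tree
  let ancestors := pvLcaClimb (tree.length + 1) parent PySem.Set.empty a
  pvLcaFind (tree.length + 1) parent ancestors b

-- inner 'for leaf in candidates' loop body, with the break flag; bw is best_worst_case
-- (None = float('inf'): 'buckets[clade] >= inf' is always False)
def pvBucketsStep (tree : List (String × List String)) (guess : String) (bw : Option Int)
    (bk : PySem.Dict String Int × Bool) (leaf : String) : PySem.Dict String Int × Bool :=
  if bk.2 then bk
  else
    let clade := pvLca tree guess leaf
    let buckets := bk.1.modify clade 0 (· + 1)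
    if (match bw with | none => false | some w => decide (w ≤ buckets.getD clade 0)) then
      (buckets, true)
    else (buckets, false)

-- outer 'for guess in candidates' loop body; max(buckets.values()) cannot raise here
-- (buckets is nonempty once the inner loop ran on nonempty candidates), .getD 0 is unreachable
def pvGuessStep (tree : List (String × List String)) (candidates : List String)
    (st : Option String × Option Int) (guess : String) : Option String × Option Int :=
  let inner := candidates.foldl (pvBucketsStep tree guess st.2) (PySem.Dict.empty, false)
  let worst := ((PySem.List.max? inner.1.values (fun x => x))).getD 0
  if (match st.2 with | none => true | some w => decide (worst < w)) then (some guess, some worst)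
  else st

def best_leaf_guess (tree : List (String × List String)) : Option String :=
  let candidates := (tree.map Prod.fst).filter (fun node => pvIsLeaf tree node)
  (candidates.foldl (pvGuessStep tree candidates) (none, none)).1

-- ===== PORT B =====
-- chain = [leaf]; while chain[-1] in parent: chain.append(parent[chain[-1]]) — fuel-bounded
-- structural form of the same walk (fuel never exhausted under Pre_)
def pvChain : Nat → PySem.Dict String String → String → List String
  | 0, _, x => [x]
  | f+1, parent, x =>
    match parent.get? x with
    | some p => x :: pvChain f parent p
    | none => [x]

-- first B loop body: record the leaf's chain, bump cnt for every node on it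
def pvTallyStep (fuel : Nat) (parent : PySem.Dict String String)
    (st : PySem.Dict String Int × PySem.Dict String (List String)) (leaf : String) :
    PySem.Dict String Int × PySem.Dict String (List String) :=
  let chain := pvChain fuel parent leaf
  let chains := st.2.insert leaf chain
  let cnt := chain.foldl (fun d node => d.insert node (d.getD node 0 + 1)) st.1
  (cnt, chains)

-- second B loop body: worst bucket of a guess from count differences along its chain
-- (cnt[x] cannot raise for x on a recorded chain; getD 0 is unreachable)
def pvBestStep (cnt : PySem.Dict String Int) (chains : PySem.Dict String (List String))
    (best : Option String × Option Int) (guess : String) : Option String × Option Int :=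
  let chain := chains.getD guess []
  let worst := (chain.zip chain.tail).foldl (fun w p => max w (cnt.getD p.2 0 - cnt.getD p.1 0)) 1
  match best.2 with
  | none => (some guess, some worst)
  | some bw => if worst < bw then (some guess, some worst) else best

def best_leaf_guess_alt (tree : List (String × List String)) : Option String :=
  let parent := pvBuildParentMap tree
  let candidates := (tree.filter (fun pc => pc.2.isEmpty)).map Prod.fst
  let st := candidates.foldl (pvTallyStep (tree.length + 1) parent) (PySem.Dict.empty, PySem.Dict.empty)
  (candidates.foldl (pvBestStep st.1 st.2) (none, none)).1

-- ===== PRECONDITION & SPEC =====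
-- parent of x as the input dict states it: the key of the LAST entry listing x as a child
-- (the same last-wins rule Python's dict insert gives A's parent map)
def pvParentOf (tree : List (String × List String)) (x : String) : Option String :=
  ((tree.filter (fun pc => decide (x ∈ pc.2))).getLast?).map Prod.fst

-- one parent step on Option (none once a parentless node is reached)
def pvStepF (tree : List (String × List String)) : Option String → Option String :=
  fun o => o.bind (pvParentOf tree)

-- the leaf keys = A's and B's candidate guesses
def pvLeafKeys (tree : List (String × List String)) : List String :=
  (tree.filter (fun pc => pc.2.isEmpty)).map Prod.fst

-- Pre_ says the input is a well-formed dict whose leaves' ancestry is tree-shaped: keys are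
-- distinct (a Python dict cannot carry duplicate keys), following parent links from any leaf
-- terminates (no cycle through a leaf's ancestry — there A loops forever), and any two leaves'
-- ancestor paths meet (otherwise A's lca raises KeyError).  These clauses are insensitive to the
-- order of the entries and hold whenever A returns on a genuine dict.
def Pre_best_leaf_guess (tree : List (String × List String)) : Prop :=
  (tree.map Prod.fst).Nodup ∧
  (∀ l ∈ pvLeafKeys tree, (pvStepF tree)^[tree.length] (some l) = none) ∧
  (∀ l ∈ pvLeafKeys tree, ∀ l' ∈ pvLeafKeys tree, ∃ k < tree.length + 1, ∃ k' < tree.length + 1,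
      ((pvStepF tree)^[k] (some l)).isSome ∧
      (pvStepF tree)^[k] (some l) = (pvStepF tree)^[k'] (some l'))

instance (tree : List (String × List String)) : Decidable (Pre_best_leaf_guess tree) := by
  unfold Pre_best_leaf_guess; infer_instance

def pvWitness_best_leaf_guess : (List (String × List String)) :=
  [("r", ["a", "b"]), ("a", []), ("b", [])]

def Spec_best_leaf_guess (tree : List (String × List String)) (out : Option String) : Prop :=
  out = best_leaf_guess_alt tree
instance (tree : List (String × List String)) (out : Option String) :
    Decidable (Spec_best_leaf_guess tree out) := by unfold Spec_best_leaf_guess; infer_instance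

-- ===== CLAIM (what is proved, stated in full; the proofs are below) =====
def Claim_equal_best_leaf_guess : Prop := ∀ (tree : List (String × List String)),
  Dom_best_leaf_guess tree → Pre_best_leaf_guess tree →
  Spec_best_leaf_guess tree (best_leaf_guess tree)

-- ===== LEMMAS AND PROOFS =====

-- proof-side abbreviations
def pvKeys (tree : List (String × List String)) : List String := tree.map Prod.fst
-- x's ancestor walk terminates
def pvGrounded (tree : List (String × List String)) (x : String) : Prop :=
  (pvStepF tree)^[tree.length] (some x) = none
-- rank: length of x's ancestor chain (number of iterates still defined)
def pvDepth (tree : List (String × List String)) (x : String) : Nat :=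
  (List.range (tree.length + 1)).countP (fun k => ((pvStepF tree)^[k] (some x)).isSome)
def pvChainN (tree : List (String × List String)) (x : String) : List String :=
  pvChain (tree.length + 1) (pvBuildParentMap tree) x
def pvLcaVal (tree : List (String × List String)) (g l : String) : String :=
  ((pvChainN tree l).find? (fun z => decide (z ∈ pvChainN tree g))).getD l
def pvS (tree : List (String × List String)) (v : String) : Nat :=
  (pvLeafKeys tree).countP (fun l => decide (v ∈ pvChainN tree l))
def pvW (tree : List (String × List String)) (g : String) : Int :=
  ((pvChainN tree g).zip (pvChainN tree g).tail).foldl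
    (fun w p => max w ((pvS tree p.2 : Int) - (pvS tree p.1 : Int))) 1
def pvStep (tree : List (String × List String)) (st : Option String × Option Int) (g : String) :
    Option String × Option Int :=
  match st.2 with
  | none => (some g, some (pvW tree g))
  | some bw => if pvW tree g < bw then (some g, some (pvW tree g)) else st

-- ---------- parent-map characterisation ----------
theorem pv_get?_foldl_insert_const (cs : List String) (p : String)
    (d : PySem.Dict String String) (x : String) :
    (cs.foldl (fun d c => d.insert c p) d).get? x = if x ∈ cs then some p else d.get? x := by
  induction cs generalizing d with
  | nil => simp
  | cons c cs ih =>
    simp only [List.foldl_cons, ih, List.mem_cons, PySem.Dict.get?_insert]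
    by_cases hx : x ∈ cs <;> by_cases hc : x = c <;> simp [hx, hc]

theorem pv_parentMap_go (l : List (String × List String)) (d : PySem.Dict String String)
    (x : String) :
    (l.foldl (fun parent pc => pc.2.foldl (fun par c => par.insert c pc.1) parent) d).get? x =
      match (l.filter (fun pc => decide (x ∈ pc.2))).getLast? with
      | some pc => some pc.1
      | none => d.get? x := by
  induction l generalizing d with
  | nil => simp
  | cons pc l ih =>
    simp only [List.foldl_cons, ih, List.filter_cons]
    by_cases hx : x ∈ pc.2
    · simp only [hx, decide_true, if_true]
      cases hlast : (l.filter (fun pc => decide (x ∈ pc.2))).getLast? with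
      | some qc => simp [List.getLast?_cons, hlast]
      | none => simp [List.getLast?_cons, hlast, pv_get?_foldl_insert_const, hx]
    · simp only [hx, decide_false]
      cases hlast : (l.filter (fun pc => decide (x ∈ pc.2))).getLast? with
      | some qc => simp [hlast]
      | none => simp [hlast, pv_get?_foldl_insert_const, hx]

-- A's (and B's) parent map agrees with the declarative pvParentOf of the precondition
theorem pv_get?_eq_parentOf (tree : List (String × List String)) (x : String) :
    (pvBuildParentMap tree).get? x = pvParentOf tree x := by
  rw [pvBuildParentMap, pv_parentMap_go]
  cases hlast : (tree.filter (fun pc => decide (x ∈ pc.2))).getLast? with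
  | some qc => simp [pvParentOf, hlast]
  | none => simp [pvParentOf, hlast, PySem.Dict.get?_empty]

theorem pv_parent_some {tree : List (String × List String)} {x p : String}
    (h : (pvBuildParentMap tree).get? x = some p) : ∃ pc ∈ tree, pc.1 = p ∧ x ∈ pc.2 := by
  rw [pvBuildParentMap, pv_parentMap_go] at h
  cases hlast : (tree.filter (fun pc => decide (x ∈ pc.2))).getLast? with
  | some qc =>
    rw [hlast] at h
    have hmem : qc ∈ tree.filter (fun pc => decide (x ∈ pc.2)) := List.mem_of_getLast? hlast
    have h1 := List.of_mem_filter hmem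
    exact ⟨qc, List.mem_of_mem_filter hmem, by simpa using h, by simpa using h1⟩
  | none => rw [hlast] at h; simp at h

-- ---------- the depth rank from the precondition's iterates ----------
theorem pv_iter_none (tree : List (String × List String)) (j : Nat) :
    (pvStepF tree)^[j] none = none :=
  Function.iterate_fixed rfl j

theorem pv_stepF_some {tree : List (String × List String)} {x p : String}
    (hp : pvParentOf tree x = some p) : pvStepF tree (some x) = some p := by
  simp [pvStepF, hp]

theorem pv_grounded_parent {tree : List (String × List String)} {x p : String}
    (hx : pvGrounded tree x) (hp : pvParentOf tree x = some p) : pvGrounded tree p := by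
  have h1 : (pvStepF tree)^[tree.length] (some p) =
      (pvStepF tree)^[tree.length + 1] (some x) := by
    rw [Function.iterate_succ_apply, pv_stepF_some hp]
  rw [pvGrounded, h1, Function.iterate_succ_apply', hx]
  rfl

theorem pv_depth_pos (tree : List (String × List String)) (x : String) :
    1 ≤ pvDepth tree x := by
  have h : 0 < (List.range (tree.length + 1)).countP
      (fun k => ((pvStepF tree)^[k] (some x)).isSome) :=
    List.countP_pos_iff.2 ⟨0, by simp, by simp⟩
  exact h

theorem pv_depth_le {tree : List (String × List String)} {x : String}
    (hx : pvGrounded tree x) : pvDepth tree x ≤ tree.length := by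
  rw [pvDepth, List.range_succ, List.countP_append]
  have h2 : List.countP (fun k => ((pvStepF tree)^[k] (some x)).isSome) [tree.length] = 0 := by
    have hx' : (pvStepF tree)^[tree.length] (some x) = none := hx
    simp [List.countP_cons, hx']
  have h3 := List.countP_le_length
    (p := fun k => ((pvStepF tree)^[k] (some x)).isSome) (l := List.range tree.length)
  simp only [List.length_range] at h3
  omega

theorem pv_depth_parent {tree : List (String × List String)} {x p : String}
    (hx : pvGrounded tree x) (hp : pvParentOf tree x = some p) :
    pvDepth tree x = pvDepth tree p + 1 := by
  have hgp := pv_grounded_parent hx hp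
  have hshift : ∀ k, (pvStepF tree)^[k + 1] (some x) = (pvStepF tree)^[k] (some p) := by
    intro k; rw [Function.iterate_succ_apply, pv_stepF_some hp]
  have h1 : pvDepth tree x =
      (List.range tree.length).countP
        (fun k => ((pvStepF tree)^[k] (some p)).isSome) + 1 := by
    rw [pvDepth, List.range_succ_eq_map, List.countP_cons]
    simp only [Function.iterate_zero_apply, Option.isSome_some, if_true]
    rw [List.countP_map]
    congr 1
    apply List.countP_congr
    intro k _
    simp only [Function.comp_apply, Nat.succ_eq_add_one, hshift k]
  have h2 : pvDepth tree p =
      (List.range tree.length).countP (fun k => ((pvStepF tree)^[k] (some p)).isSome) := by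
    rw [pvDepth, List.range_succ, List.countP_append]
    have hgp' : (pvStepF tree)^[tree.length] (some p) = none := hgp
    simp [List.countP_cons, hgp']
  omega

-- ---------- chain structure ----------
theorem pv_chain_cons (f : Nat) (P : PySem.Dict String String) (x : String) :
    ∃ t, pvChain f P x = x :: t := by
  cases f with
  | zero => exact ⟨[], rfl⟩
  | succ f =>
    cases h : P.get? x with
    | some p => exact ⟨pvChain f P p, by simp [pvChain, h]⟩
    | none => exact ⟨[], by simp [pvChain, h]⟩

theorem pv_chain_self_mem (f : Nat) (P : PySem.Dict String String) (x : String) :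
    x ∈ pvChain f P x := by
  obtain ⟨t, ht⟩ := pv_chain_cons f P x; simp [ht]

theorem pv_chain_getElem_zero (f : Nat) (P : PySem.Dict String String) (x : String)
    (h : 0 < (pvChain f P x).length) : (pvChain f P x)[0] = x := by
  obtain ⟨t, ht⟩ := pv_chain_cons f P x; simp [ht]

theorem pv_chain_fuel (tree : List (String × List String)) :
    ∀ f g x, pvGrounded tree x → pvDepth tree x ≤ f → pvDepth tree x ≤ g →
    pvChain f (pvBuildParentMap tree) x = pvChain g (pvBuildParentMap tree) x := by
  intro f
  induction f with
  | zero => intro g x _ hf _; have := pv_depth_pos tree x; omega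
  | succ f ih =>
    intro g x hx hf hg
    cases g with
    | zero => have := pv_depth_pos tree x; omega
    | succ g =>
      cases hp : (pvBuildParentMap tree).get? x with
      | none => simp [pvChain, hp]
      | some p =>
        have hp' : pvParentOf tree x = some p := by rw [← pv_get?_eq_parentOf, hp]
        have hgp := pv_grounded_parent hx hp'
        have hdp := pv_depth_parent hx hp'
        simp only [pvChain, hp]
        exact congrArg _ (ih g p hgp (by omega) (by omega))

theorem pv_chain_mem (tree : List (String × List String)) :
    ∀ f x, pvGrounded tree x → pvDepth tree x ≤ f →
    ∀ y ∈ pvChain f (pvBuildParentMap tree) x,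
      pvGrounded tree y ∧ pvDepth tree y ≤ pvDepth tree x := by
  intro f
  induction f with
  | zero => intro x _ hf; have := pv_depth_pos tree x; omega
  | succ f ih =>
    intro x hx hf y hy
    cases hp : (pvBuildParentMap tree).get? x with
    | none =>
      simp [pvChain, hp] at hy; subst hy; exact ⟨hx, le_refl _⟩
    | some p =>
      simp only [pvChain, hp, List.mem_cons] at hy
      rcases hy with rfl | hy
      · exact ⟨hx, le_refl _⟩
      · have hp' : pvParentOf tree x = some p := by rw [← pv_get?_eq_parentOf, hp]
        have hgp := pv_grounded_parent hx hp'
        have hdp := pv_depth_parent hx hp'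
        obtain ⟨h1, h2⟩ := ih p hgp (by omega) y hy
        exact ⟨h1, by omega⟩

theorem pv_chain_pairwise (tree : List (String × List String)) :
    ∀ f x, pvGrounded tree x → pvDepth tree x ≤ f →
    (pvChain f (pvBuildParentMap tree) x).Pairwise
      (fun a b => pvDepth tree b < pvDepth tree a) := by
  intro f
  induction f with
  | zero => intro x _ hf; have := pv_depth_pos tree x; omega
  | succ f ih =>
    intro x hx hf
    cases hp : (pvBuildParentMap tree).get? x with
    | none => simp [pvChain, hp]
    | some p =>
      have hp' : pvParentOf tree x = some p := by rw [← pv_get?_eq_parentOf, hp]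
      have hgp := pv_grounded_parent hx hp'
      have hdp := pv_depth_parent hx hp'
      simp only [pvChain, hp, List.pairwise_cons]
      constructor
      · intro y hy
        have := (pv_chain_mem tree f p hgp (by omega) y hy).2
        omega
      · exact ih p hgp (by omega)

theorem pv_chain_nodup {tree : List (String × List String)} {f : Nat} {x : String}
    (hx : pvGrounded tree x) (hf : pvDepth tree x ≤ f) :
    (pvChain f (pvBuildParentMap tree) x).Nodup := by
  have := pv_chain_pairwise tree f x hx hf
  exact this.imp (fun h => by intro he; subst he; omega)

theorem pv_chain_suffix (tree : List (String × List String)) :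
    ∀ f x, pvGrounded tree x → pvDepth tree x ≤ f →
    ∀ y ∈ pvChain f (pvBuildParentMap tree) x,
      pvChainN tree y <:+ pvChain f (pvBuildParentMap tree) x := by
  intro f
  induction f with
  | zero => intro x _ hf; have := pv_depth_pos tree x; omega
  | succ f ih =>
    intro x hx hf y hy
    cases hp : (pvBuildParentMap tree).get? x with
    | none =>
      simp [pvChain, hp] at hy; subst hy
      have h : pvChainN tree y = pvChain (f+1) (pvBuildParentMap tree) y :=
        pv_chain_fuel tree (tree.length + 1) (f+1) y hx
          (by have := pv_depth_le hx; omega) hf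
      rw [h]
    | some p =>
      simp only [pvChain, hp, List.mem_cons] at hy
      rcases hy with rfl | hy
      · have h : pvChainN tree y = pvChain (f+1) (pvBuildParentMap tree) y :=
          pv_chain_fuel tree (tree.length + 1) (f+1) y hx
            (by have := pv_depth_le hx; omega) hf
        rw [h]
      · have hp' : pvParentOf tree x = some p := by rw [← pv_get?_eq_parentOf, hp]
        have hgp := pv_grounded_parent hx hp'
        have hdp := pv_depth_parent hx hp'
        have hsuf := ih p hgp (by omega) y hy
        simp only [pvChain, hp]
        exact hsuf.trans (List.suffix_cons x _)

theorem pv_chainN_suffix {tree : List (String × List String)} {x y : String}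
    (hx : pvGrounded tree x) (hy : y ∈ pvChainN tree x) :
    pvChainN tree y <:+ pvChainN tree x :=
  pv_chain_suffix tree (tree.length + 1) x hx (by have := pv_depth_le hx; omega) y hy

theorem pv_chain_closure {tree : List (String × List String)} {x y q : String}
    (hx : pvGrounded tree x) (hy : y ∈ pvChainN tree x)
    (hq : (pvBuildParentMap tree).get? y = some q) : q ∈ pvChainN tree x := by
  have hsuf := pv_chainN_suffix hx hy
  have hchain : pvChainN tree y = y :: pvChain tree.length (pvBuildParentMap tree) q := by
    simp [pvChainN, pvChain, hq]
  have hmem : q ∈ pvChainN tree y := by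
    rw [hchain]; exact List.mem_cons_of_mem _ (pv_chain_self_mem _ _ _)
  exact List.IsSuffix.mem hmem hsuf

theorem pv_chain_consec (f : Nat) (P : PySem.Dict String String) :
    ∀ x (i : Nat) (h : i + 1 < (pvChain f P x).length),
    P.get? ((pvChain f P x)[i]'(by omega)) = some ((pvChain f P x)[i+1]'h) := by
  induction f with
  | zero => intro x i h; simp [pvChain] at h
  | succ f ih =>
    intro x i h
    cases hp : P.get? x with
    | none => simp [pvChain, hp] at h
    | some p =>
      simp only [pvChain, hp] at h ⊢
      cases i with
      | zero =>
        simp only [List.getElem_cons_zero, List.getElem_cons_succ]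
        rw [pv_chain_getElem_zero f P p (by simpa using h)]
        exact hp
      | succ i =>
        simp only [List.getElem_cons_succ]
        exact ih p i (by simpa using h)

-- an iterate value of the parent walk lies on the chain
theorem pv_iter_mem_chainN {tree : List (String × List String)} :
    ∀ (k : Nat) (x y : String), pvGrounded tree x →
    (pvStepF tree)^[k] (some x) = some y → y ∈ pvChainN tree x := by
  intro k
  induction k with
  | zero =>
    intro x y _ h
    simp only [Function.iterate_zero_apply, Option.some.injEq] at h
    subst h
    exact pv_chain_self_mem _ _ _
  | succ k ih =>
    intro x y hx h
    rw [Function.iterate_succ_apply] at h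
    cases hp : pvParentOf tree x with
    | none =>
      rw [show pvStepF tree (some x) = none by simp [pvStepF, hp], pv_iter_none] at h
      simp at h
    | some p =>
      rw [pv_stepF_some hp] at h
      have hgp := pv_grounded_parent hx hp
      have hyp := ih p y hgp h
      have hget : (pvBuildParentMap tree).get? x = some p := by
        rw [pv_get?_eq_parentOf]; exact hp
      have hchain : pvChainN tree x = x :: pvChain tree.length (pvBuildParentMap tree) p := by
        simp [pvChainN, pvChain, hget]
      have hfp : pvChain tree.length (pvBuildParentMap tree) p = pvChainN tree p :=
        pv_chain_fuel tree tree.length (tree.length + 1) p hgp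
          (pv_depth_le hgp) (by have := pv_depth_le hgp; omega)
      rw [hchain, hfp]
      exact List.mem_cons_of_mem _ hyp

-- any two leaves' chains meet (precondition clause 3 through the iterate bridge)
theorem pv_chains_meet {tree : List (String × List String)}
    (hPre : Pre_best_leaf_guess tree) {g l : String}
    (hg : g ∈ pvLeafKeys tree) (hl : l ∈ pvLeafKeys tree) :
    ∃ r, r ∈ pvChainN tree g ∧ r ∈ pvChainN tree l := by
  obtain ⟨k, -, k', -, hsome, heq⟩ := hPre.2.2 g hg l hl
  cases hr : (pvStepF tree)^[k] (some g) with
  | none => rw [hr] at hsome; simp at hsome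
  | some r =>
    refine ⟨r, pv_iter_mem_chainN k g r (hPre.2.1 g hg) hr, ?_⟩
    rw [hr] at heq
    exact pv_iter_mem_chainN k' l r (hPre.2.1 l hl) heq.symm

-- ---------- the climb builds the chain as a set; the find walks the chain ----------
theorem pv_climb_eq (f : Nat) (P : PySem.Dict String String) :
    ∀ x (s : PySem.Set String), pvLcaClimb f P s x = (pvChain f P x).foldl PySem.Set.add s := by
  induction f with
  | zero => intro x s; simp [pvLcaClimb, pvChain]
  | succ f ih =>
    intro x s
    cases hp : P.get? x with
    | some p => simp [pvLcaClimb, pvChain, hp, ih]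
    | none => simp [pvLcaClimb, pvChain, hp]

theorem pv_mem_climb (f : Nat) (P : PySem.Dict String String) (x y : String) :
    y ∈ pvLcaClimb f P PySem.Set.empty x ↔ y ∈ pvChain f P x := by
  rw [pv_climb_eq]
  have h := PySem.Set.mem_foldl_add (pvChain f P x) (fun z => z) PySem.Set.empty y
  constructor
  · intro hm
    rcases (h.1 hm) with hs | ⟨b, hb, rfl⟩
    · simp [PySem.Set.empty] at hs
    · exact hb
  · intro hm
    exact h.2 (Or.inr ⟨y, hm, rfl⟩)

theorem pv_find_eq (tree : List (String × List String))
    (C : List String) (anc : PySem.Set String) (hanc : ∀ z, z ∈ anc ↔ z ∈ C) :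
    ∀ f l, pvGrounded tree l → pvDepth tree l ≤ f →
    ∀ y, (pvChainN tree l).find? (fun z => decide (z ∈ C)) = some y →
    pvLcaFind f (pvBuildParentMap tree) anc l = y := by
  intro f
  induction f with
  | zero => intro l _ hf; have := pv_depth_pos tree l; omega
  | succ f ih =>
    intro l hl hf y hy
    by_cases hmem : l ∈ C
    · have hc : PySem.Set.contains anc l = true := by
        rw [PySem.Set.contains_eq_decide]; exact decide_eq_true ((hanc l).2 hmem)
      obtain ⟨t, ht⟩ := pv_chain_cons (tree.length + 1) (pvBuildParentMap tree) l
      have ht' : pvChainN tree l = l :: t := ht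
      rw [ht'] at hy
      rw [List.find?_cons_of_pos (by simpa using hmem)] at hy
      simp only [pvLcaFind, hc, if_true]
      exact Option.some.inj hy
    · have hc : PySem.Set.contains anc l = false := by
        rw [PySem.Set.contains_eq_decide]
        exact decide_eq_false (fun h => hmem ((hanc l).1 h))
      simp only [pvLcaFind, hc, Bool.false_eq_true, if_false]
      cases hp : (pvBuildParentMap tree).get? l with
      | none =>
        have hsing : pvChainN tree l = [l] := by simp [pvChainN, pvChain, hp]
        rw [hsing] at hy
        rw [List.find?_cons_of_neg (by simpa using hmem)] at hy
        simp at hy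
      | some p =>
        have hp' : pvParentOf tree l = some p := by rw [← pv_get?_eq_parentOf, hp]
        have hgp := pv_grounded_parent hl hp'
        have hdp := pv_depth_parent hl hp'
        have hgd : (pvBuildParentMap tree).getD l l = p := by
          simp [PySem.Dict.getD_eq_get?_getD, hp]
        rw [hgd]
        apply ih p hgp (by omega) y
        have hchain : pvChainN tree l = l :: pvChain tree.length (pvBuildParentMap tree) p := by
          simp [pvChainN, pvChain, hp]
        have hfp : pvChain tree.length (pvBuildParentMap tree) p = pvChainN tree p :=
          pv_chain_fuel tree tree.length (tree.length + 1) p hgp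
            (pv_depth_le hgp) (by have := pv_depth_le hgp; omega)
        rw [hchain, hfp] at hy
        rw [List.find?_cons_of_neg (by simpa using hmem)] at hy
        exact hy

theorem pv_find?_isSome {tree : List (String × List String)}
    (hPre : Pre_best_leaf_guess tree) {g l : String}
    (hg : g ∈ pvLeafKeys tree) (hl : l ∈ pvLeafKeys tree) :
    ∃ y, (pvChainN tree l).find? (fun z => decide (z ∈ pvChainN tree g)) = some y := by
  obtain ⟨r, hrg, hrl⟩ := pv_chains_meet hPre hg hl
  rcases h : (pvChainN tree l).find? (fun z => decide (z ∈ pvChainN tree g)) with _ | y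
  · exfalso
    have := List.find?_eq_none.1 h r hrl
    simp [hrg] at this
  · exact ⟨y, rfl⟩

theorem pv_lca_eq {tree : List (String × List String)} (hPre : Pre_best_leaf_guess tree)
    {g l : String} (hg : g ∈ pvLeafKeys tree) (hl : l ∈ pvLeafKeys tree) :
    pvLca tree g l = pvLcaVal tree g l ∧
    (pvChainN tree l).find? (fun z => decide (z ∈ pvChainN tree g)) =
      some (pvLcaVal tree g l) := by
  obtain ⟨y, hy⟩ := pv_find?_isSome hPre hg hl
  have hval : pvLcaVal tree g l = y := by simp [pvLcaVal, hy]
  have hanc : ∀ z, z ∈ pvLcaClimb (tree.length+1) (pvBuildParentMap tree) PySem.Set.empty g ↔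
      z ∈ pvChainN tree g := fun z => pv_mem_climb _ _ _ _
  have hfind := pv_find_eq tree (pvChainN tree g) _ hanc (tree.length+1) l
    (hPre.2.1 l hl) (by have := pv_depth_le (hPre.2.1 l hl); omega) y hy
  refine ⟨?_, hval ▸ hy⟩
  rw [hval]
  simpa [pvLca] using hfind

-- ---------- leaves ----------
theorem pv_cand_mem_iff {tree : List (String × List String)} {l : String} :
    l ∈ pvLeafKeys tree ↔ ∃ pc ∈ tree, pc.1 = l ∧ pc.2 = [] := by
  simp only [pvLeafKeys, List.mem_map, List.mem_filter]
  constructor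
  · rintro ⟨pc, ⟨h1, h2⟩, rfl⟩; exact ⟨pc, h1, rfl, by simpa [List.isEmpty_iff] using h2⟩
  · rintro ⟨pc, h1, rfl, h2⟩; exact ⟨pc, ⟨h1, by simp [h2]⟩, rfl⟩

theorem pv_cand_nodup {tree : List (String × List String)} (hnd : (tree.map Prod.fst).Nodup) :
    (pvLeafKeys tree).Nodup := by
  have hsub : (pvLeafKeys tree).Sublist (tree.map Prod.fst) :=
    List.Sublist.map Prod.fst List.filter_sublist
  exact hsub.nodup hnd

theorem pv_entry_unique {tree : List (String × List String)} (hnd : (tree.map Prod.fst).Nodup)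
    {pc qc : String × List String} (hp : pc ∈ tree) (hq : qc ∈ tree) (h : pc.1 = qc.1) :
    pc = qc := by
  induction tree with
  | nil => simp at hp
  | cons rc t ih =>
    have hnd' : (t.map Prod.fst).Nodup := (List.nodup_cons.1 (by simpa using hnd)).2
    have hrc : rc.1 ∉ t.map Prod.fst := (List.nodup_cons.1 (by simpa using hnd)).1
    rcases List.mem_cons.1 hp with hp' | hp' <;> rcases List.mem_cons.1 hq with hq' | hq'
    · rw [hp', hq']
    · exact absurd (List.mem_map.2 ⟨qc, hq', by rw [← h, hp']⟩) hrc
    · exact absurd (List.mem_map.2 ⟨pc, hp', by rw [h, hq']⟩) hrc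
    · exact ih hnd' hp' hq'

-- a leaf is on another node's chain only if it IS that node
theorem pv_leaf_alone {tree : List (String × List String)}
    (hnd : (tree.map Prod.fst).Nodup) {g : String} (hg : g ∈ pvLeafKeys tree) :
    ∀ f x, pvGrounded tree x → pvDepth tree x ≤ f →
    g ∈ pvChain f (pvBuildParentMap tree) x → x = g := by
  intro f
  induction f with
  | zero => intro x _ hf; have := pv_depth_pos tree x; omega
  | succ f ih =>
    intro x hx hf hmem
    cases hp : (pvBuildParentMap tree).get? x with
    | none => simp [pvChain, hp] at hmem; exact hmem.symm
    | some p =>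
      simp only [pvChain, hp, List.mem_cons] at hmem
      rcases hmem with rfl | hmem
      · rfl
      · have hp' : pvParentOf tree x = some p := by rw [← pv_get?_eq_parentOf, hp]
        have hgp := pv_grounded_parent hx hp'
        have hdp := pv_depth_parent hx hp'
        have hpg : p = g := ih p hgp (by omega) hmem
        subst hpg
        obtain ⟨pc, hpc, hp1, hxc⟩ := pv_parent_some hp
        obtain ⟨qc, hqc, hq1, hq2⟩ := pv_cand_mem_iff.1 hg
        have hpq : pc = qc := pv_entry_unique hnd hpc hqc (by rw [hp1, hq1])
        subst hpq
        rw [hq2] at hxc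
        simp at hxc

-- position of a suffix in a Nodup list
theorem pv_suffix_drop {C s : List String} (hC : C.Nodup) (hs : s <:+ C) {y : String}
    {t : List String} (hsy : s = y :: t) {k : Nat} (hk : k < C.length) (hky : C[k] = y) :
    s = C.drop k := by
  obtain ⟨pre, hpre⟩ := hs
  have hlen : pre.length + s.length = C.length := by rw [← hpre]; simp
  have hslen : 0 < s.length := by rw [hsy]; simp
  have hplt : pre.length < C.length := by omega
  have hppos : C[pre.length]'hplt = y := by
    have hC2 : C = pre ++ y :: t := by rw [← hpre, hsy]
    subst hC2
    simp
  have hkk : k = pre.length := (List.Nodup.getElem_inj_iff hC).1 (by rw [hky, hppos])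
  subst hkk
  rw [← hpre]
  simp

-- ---------- characterisation of A's lca against chain membership ----------
theorem pv_lcaVal_mem {tree : List (String × List String)} (hPre : Pre_best_leaf_guess tree)
    {g l : String} (hg : g ∈ pvLeafKeys tree) (hl : l ∈ pvLeafKeys tree) :
    pvLcaVal tree g l ∈ pvChainN tree g ∧ pvLcaVal tree g l ∈ pvChainN tree l := by
  have h := (pv_lca_eq hPre hg hl).2
  exact ⟨by simpa using List.find?_some h, List.mem_of_find?_eq_some h⟩

theorem pv_lcaVal_self (tree : List (String × List String)) (g : String) :
    pvLcaVal tree g g = g := by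
  obtain ⟨t, ht⟩ := pv_chain_cons (tree.length + 1) (pvBuildParentMap tree) g
  have ht' : pvChainN tree g = g :: t := ht
  rw [pvLcaVal, ht']
  rw [List.find?_cons_of_pos (by simp)]
  rfl

theorem pv_lcaVal_eq_self_iff {tree : List (String × List String)}
    (hPre : Pre_best_leaf_guess tree) {g l : String} (hg : g ∈ pvLeafKeys tree)
    (hl : l ∈ pvLeafKeys tree) : pvLcaVal tree g l = g ↔ l = g := by
  constructor
  · intro h
    have hm := (pv_lcaVal_mem hPre hg hl).2
    rw [h] at hm
    exact pv_leaf_alone hPre.1 hg (tree.length + 1) l (hPre.2.1 l hl)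
      (by have := pv_depth_le (hPre.2.1 l hl); omega) hm
  · intro h; rw [h]; exact pv_lcaVal_self tree g

-- main characterisation: lca(g,l) = a for a consecutive pair (b,a) on g's chain
-- iff a is on l's chain and b is not
theorem pv_lcaVal_pair_iff {tree : List (String × List String)}
    (hPre : Pre_best_leaf_guess tree) {g l : String}
    (hg : g ∈ pvLeafKeys tree) (hl : l ∈ pvLeafKeys tree)
    {i : Nat} (hi : i + 1 < (pvChainN tree g).length) :
    pvLcaVal tree g l = (pvChainN tree g)[i+1]'hi ↔
      ((pvChainN tree g)[i+1]'hi ∈ pvChainN tree l ∧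
       (pvChainN tree g)[i]'(by omega) ∉ pvChainN tree l) := by
  have hGg : pvGrounded tree g := hPre.2.1 g hg
  have hGl : pvGrounded tree l := hPre.2.1 l hl
  have hfg : pvDepth tree g ≤ tree.length + 1 := by have := pv_depth_le hGg; omega
  have hfl : pvDepth tree l ≤ tree.length + 1 := by have := pv_depth_le hGl; omega
  have hndg : (pvChainN tree g).Nodup := pv_chain_nodup hGg hfg
  have hPb : (pvBuildParentMap tree).get? ((pvChainN tree g)[i]'(by omega)) =
      some ((pvChainN tree g)[i+1]'hi) := pv_chain_consec _ _ g i hi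
  obtain ⟨hyCg, as, bs, hdec, has⟩ :=
    List.find?_eq_some_iff_append.1 (pv_lca_eq hPre hg hl).2
  have hyCg' : pvLcaVal tree g l ∈ pvChainN tree g := by simpa using hyCg
  have hyCl : pvLcaVal tree g l ∈ pvChainN tree l := by rw [hdec]; simp
  have hbG : pvGrounded tree ((pvChainN tree g)[i]'(by omega)) :=
    (pv_chain_mem tree _ g hGg hfg _ (List.getElem_mem _)).1
  have hPb' : pvParentOf tree ((pvChainN tree g)[i]'(by omega)) =
      some ((pvChainN tree g)[i+1]'hi) := by rw [← pv_get?_eq_parentOf]; exact hPb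
  have hidxb : pvDepth tree ((pvChainN tree g)[i+1]'hi) <
      pvDepth tree ((pvChainN tree g)[i]'(by omega)) := by
    have := pv_depth_parent hbG hPb'
    omega
  have hpairl : (pvChainN tree l).Pairwise (fun u v => pvDepth tree v < pvDepth tree u) :=
    pv_chain_pairwise tree _ l hGl hfl
  constructor
  · intro hya
    refine ⟨hya ▸ hyCl, ?_⟩
    intro hbCl
    rw [hdec, hya] at hbCl
    rcases List.mem_append.1 hbCl with hbas | hbys
    · have h1 := has _ hbas
      simp only [Bool.not_eq_eq_eq_not, Bool.not_true, decide_eq_false_iff_not] at h1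
      exact h1 (List.getElem_mem _)
    · rcases List.mem_cons.1 hbys with hby | hbbs
      · rw [hby] at hidxb; omega
      · rw [hdec, hya] at hpairl
        have hlt := (List.pairwise_cons.1 (List.pairwise_append.1 hpairl).2.1).1 _ hbbs
        omega
  · rintro ⟨haCl, hbCl⟩
    rw [hdec] at haCl
    rcases List.mem_append.1 haCl with haas | hays
    · exfalso
      have h1 := has _ haas
      simp only [Bool.not_eq_eq_eq_not, Bool.not_true, decide_eq_false_iff_not] at h1
      exact h1 (List.getElem_mem _)
    · rcases List.mem_cons.1 hays with hay | habs
      · exact hay.symm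
      · exfalso
        obtain ⟨j, hj, hjy⟩ := List.mem_iff_getElem.1 hyCg'
        have hsufy := pv_chainN_suffix hGg hyCg'
        obtain ⟨ty, hty⟩ :=
          pv_chain_cons (tree.length + 1) (pvBuildParentMap tree) (pvLcaVal tree g l)
        have hty' : pvChainN tree (pvLcaVal tree g l) = pvLcaVal tree g l :: ty := hty
        have hdropy : pvChainN tree (pvLcaVal tree g l) = (pvChainN tree g).drop j :=
          pv_suffix_drop hndg hsufy hty' hj hjy
        have hya_lt : pvDepth tree ((pvChainN tree g)[i+1]'hi) <
            pvDepth tree (pvLcaVal tree g l) := by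
          rw [hdec] at hpairl
          exact (List.pairwise_cons.1 (List.pairwise_append.1 hpairl).2.1).1 _ habs
        have hpairg : (pvChainN tree g).Pairwise
            (fun u v => pvDepth tree v < pvDepth tree u) :=
          pv_chain_pairwise tree _ g hGg hfg
        have hji : j ≤ i := by
          by_contra hji
          rcases Nat.lt_or_ge (i+1) j with hlt | hge
          · have := List.pairwise_iff_getElem.1 hpairg (i+1) j hi hj hlt
            rw [hjy] at this
            omega
          · have hj_eq : j = i + 1 := by omega
            subst hj_eq
            rw [hjy] at hya_lt
            omega
        have hbmem : (pvChainN tree g)[i]'(by omega) ∈ (pvChainN tree g).drop j := by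
          have hgd : ((pvChainN tree g).drop j)[i - j]'(by
              rw [List.length_drop]; omega) = (pvChainN tree g)[i]'(by omega) := by
            rw [List.getElem_drop]
            congr 1
            omega
          rw [← hgd]
          exact List.getElem_mem _
        rw [← hdropy] at hbmem
        exact hbCl (List.IsSuffix.mem hbmem (pv_chainN_suffix hGl hyCl))

-- ---------- counting ----------
theorem pv_countP_split {α : Type} (l : List α) (p q : α → Bool)
    (h : ∀ x ∈ l, q x = true → p x = true) :
    l.countP p = l.countP (fun x => p x && !q x) + l.countP q := by
  induction l with
  | nil => simp
  | cons a l ih =>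
    have ih' := ih (fun x hx => h x (List.mem_cons_of_mem a hx))
    by_cases hq : q a = true
    · have hp := h a List.mem_cons_self hq
      simp only [List.countP_cons, hp, hq, if_true, Bool.not_true, Bool.and_false,
        Bool.false_eq_true, if_false]
      omega
    · rw [Bool.not_eq_true] at hq
      by_cases hp : p a = true <;>
        simp only [List.countP_cons, hp, hq, Bool.not_false, Bool.and_true, if_true,
          Bool.false_eq_true, if_false, ih'] <;> omega

theorem pv_S_pair {tree : List (String × List String)} (hPre : Pre_best_leaf_guess tree)
    {g : String} (hg : g ∈ pvLeafKeys tree) {i : Nat}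
    (hi : i + 1 < (pvChainN tree g).length) :
    ((pvLeafKeys tree).map (fun l => pvLcaVal tree g l)).count ((pvChainN tree g)[i+1]'hi) +
      pvS tree ((pvChainN tree g)[i]'(by omega)) = pvS tree ((pvChainN tree g)[i+1]'hi) := by
  have hPb : (pvBuildParentMap tree).get? ((pvChainN tree g)[i]'(by omega)) =
      some ((pvChainN tree g)[i+1]'hi) := pv_chain_consec _ _ g i hi
  have hcount : ((pvLeafKeys tree).map (fun l => pvLcaVal tree g l)).count
      ((pvChainN tree g)[i+1]'hi) =
      (pvLeafKeys tree).countP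
        (fun l => decide ((pvChainN tree g)[i+1]'hi ∈ pvChainN tree l) &&
          !(decide ((pvChainN tree g)[i]'(by omega) ∈ pvChainN tree l))) := by
    rw [List.count_eq_countP, List.countP_map]
    apply List.countP_congr
    intro l hl
    have hiff := pv_lcaVal_pair_iff hPre hg hl hi
    constructor
    · intro hx
      simp only [Function.comp_apply, beq_iff_eq] at hx
      obtain ⟨h1, h2⟩ := hiff.1 hx
      simp [h1, h2]
    · intro hx
      simp only [Bool.and_eq_true, decide_eq_true_eq, Bool.not_eq_eq_eq_not, Bool.not_true,
        decide_eq_false_iff_not] at hx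
      simp only [Function.comp_apply, beq_iff_eq]
      exact hiff.2 hx
  rw [hcount, pvS, pvS]
  have hsplit := pv_countP_split (pvLeafKeys tree)
    (fun l => decide ((pvChainN tree g)[i+1]'hi ∈ pvChainN tree l))
    (fun l => decide ((pvChainN tree g)[i]'(by omega) ∈ pvChainN tree l))
    (fun l hl h => by
      simp only [decide_eq_true_eq] at h ⊢
      exact pv_chain_closure (hPre.2.1 l hl) h hPb)
  simp only at hsplit
  omega

theorem pv_count_self {tree : List (String × List String)} (hPre : Pre_best_leaf_guess tree)
    {g : String} (hg : g ∈ pvLeafKeys tree) :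
    ((pvLeafKeys tree).map (fun l => pvLcaVal tree g l)).count g = 1 := by
  rw [List.count_eq_countP, List.countP_map]
  have h1 : (pvLeafKeys tree).countP ((fun x => x == g) ∘ fun l => pvLcaVal tree g l) =
      (pvLeafKeys tree).countP (fun l => l == g) := by
    apply List.countP_congr
    intro l hl
    simp only [Function.comp_apply, beq_iff_eq]
    exact pv_lcaVal_eq_self_iff hPre hg hl
  rw [h1, ← List.count_eq_countP]
  exact List.count_eq_one_of_mem (pv_cand_nodup hPre.1) hg

-- ---------- fold-max helpers ----------
theorem pv_foldl_max_ge_init {α : Type} (l : List α) (f : α → Int) (a : Int) :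
    a ≤ l.foldl (fun w p => max w (f p)) a := by
  induction l generalizing a with
  | nil => simp
  | cons x l ih => exact le_trans (le_max_left _ _) (ih (max a (f x)))

theorem pv_foldl_max_ge_mem {α : Type} (f : α → Int) (l : List α) :
    ∀ (a : Int) (x : α), x ∈ l → f x ≤ l.foldl (fun w p => max w (f p)) a := by
  induction l with
  | nil => intro a x hx; simp at hx
  | cons y l ih =>
    intro a x hx
    rcases List.mem_cons.1 hx with rfl | hx
    · exact le_trans (le_max_right _ _) (pv_foldl_max_ge_init l f _)
    · exact ih _ x hx

theorem pv_foldl_max_le {α : Type} (f : α → Int) (l : List α) :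
    ∀ (a b : Int), a ≤ b → (∀ x ∈ l, f x ≤ b) → l.foldl (fun w p => max w (f p)) a ≤ b := by
  induction l with
  | nil => intro a b ha _; simpa
  | cons x l ih =>
    intro a b ha h
    exact ih (max a (f x)) b (max_le ha (h x List.mem_cons_self))
      (fun y hy => h y (List.mem_cons_of_mem x hy))

-- zip with tail: membership ↔ consecutive positions
theorem pv_zip_tail_mem {C : List String} {p : String × String} :
    p ∈ C.zip C.tail ↔ ∃ i, ∃ (h : i + 1 < C.length), p = (C[i]'(by omega), C[i+1]'h) := by
  constructor
  · intro hp
    obtain ⟨i, hi, hpe⟩ := List.mem_iff_getElem.1 hp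
    have hlen : i + 1 < C.length := by
      rw [List.length_zip, List.length_tail] at hi
      omega
    refine ⟨i, hlen, ?_⟩
    rw [← hpe, List.getElem_zip, List.getElem_tail]
  · rintro ⟨i, hi, rfl⟩
    have hlen : i < (C.zip C.tail).length := by
      rw [List.length_zip, List.length_tail]
      omega
    have hh : (C.zip C.tail)[i]'hlen = (C[i]'(by omega), C[i+1]'hi) := by
      rw [List.getElem_zip, List.getElem_tail]
    rw [← hh]
    exact List.getElem_mem _

theorem pv_w_ge_one (tree : List (String × List String)) (g : String) : 1 ≤ pvW tree g :=
  pv_foldl_max_ge_init _ _ _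

-- values of a dict bound its max; a getD ≥ 1 entry is among the values
theorem pv_max_values_ge {d : PySem.Dict String Int} {v : String} (h : 1 ≤ d.getD v 0) :
    d.getD v 0 ≤ ((PySem.List.max? d.values (fun x => x))).getD 0 := by
  have hget : d.get? v = some (d.getD v 0) := by
    rcases hg : d.get? v with _ | val
    · rw [PySem.Dict.getD_eq_get?_getD, hg] at h
      simp at h
    · rw [PySem.Dict.getD_eq_get?_getD, hg]
      simp
  have hitem : (v, d.getD v 0) ∈ d.items := PySem.Dict.mem_items_of_get?_eq_some d hget
  have hval : d.getD v 0 ∈ d.values := by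
    simp only [PySem.Dict.values]
    exact List.mem_map.2 ⟨(v, d.getD v 0), hitem, rfl⟩
  rcases hm : PySem.List.max? d.values (fun x => x) with _ | m
  · rw [PySem.List.max?_eq_none_iff _ _] at hm
    rw [hm] at hval
    simp at hval
  · have := PySem.List.max?_isMax hm _ hval
    simpa using this

-- ---------- the central identity: A's worst bucket = B's chain-walk maximum ----------
theorem pv_chainN_getElem_zero (tree : List (String × List String)) (x : String)
    (h : 0 < (pvChainN tree x).length) : (pvChainN tree x)[0] = x :=
  pv_chain_getElem_zero _ _ _ h

def pvLg (tree : List (String × List String)) (g : String) : List String :=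
  (pvLeafKeys tree).map (fun leaf => pvLcaVal tree g leaf)

theorem pv_wA_eq_w {tree : List (String × List String)} (hPre : Pre_best_leaf_guess tree)
    {g : String} (hg : g ∈ pvLeafKeys tree) :
    ((PySem.List.max? (PySem.Dict.counter
      ((pvLeafKeys tree).map (fun leaf => pvLca tree g leaf))).values (fun x => x))).getD 0 =
    pvW tree g := by
  have hGg : pvGrounded tree g := hPre.2.1 g hg
  have hmapeq : (pvLeafKeys tree).map (fun leaf => pvLca tree g leaf) = pvLg tree g :=
    List.map_congr_left (fun l hl => (pv_lca_eq hPre hg hl).1)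
  rw [hmapeq]
  have hvals : (PySem.Dict.counter (pvLg tree g)).values =
      (PySem.Set.ofList (pvLg tree g)).map (fun k => (((pvLg tree g).count k : Int))) := by
    simp [PySem.Dict.values, PySem.Dict.items_counter, List.map_map, Function.comp]
  have hgLg : g ∈ pvLg tree g :=
    List.mem_map.2 ⟨g, hg, pv_lcaVal_self tree g⟩
  have hgSet : g ∈ PySem.Set.ofList (pvLg tree g) := (PySem.Set.mem_ofList _ _).2 hgLg
  have hcount_self : ((pvLg tree g).count g : Int) = 1 := by
    rw [pvLg, pv_count_self hPre hg]; rfl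
  have hvne : (PySem.Dict.counter (pvLg tree g)).values ≠ [] := by
    rw [hvals]
    intro hcon
    rw [List.map_eq_nil_iff] at hcon
    rw [hcon] at hgSet
    simp at hgSet
  cases hm : PySem.List.max? (PySem.Dict.counter (pvLg tree g)).values (fun x => x) with
  | none => exact absurd ((PySem.List.max?_eq_none_iff _ _).1 hm) hvne
  | some m =>
    have hmmem : m ∈ (PySem.Dict.counter (pvLg tree g)).values := PySem.List.max?_mem hm
    have hmax : ∀ y ∈ (PySem.Dict.counter (pvLg tree g)).values, y ≤ m := by
      intro y hy
      simpa using PySem.List.max?_isMax hm y hy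
    have h1m : (1 : Int) ≤ m := by
      have hv1 : (((pvLg tree g).count g : Int)) ∈
          (PySem.Dict.counter (pvLg tree g)).values := by
        rw [hvals]
        exact List.mem_map.2 ⟨g, hgSet, rfl⟩
      have := hmax _ hv1
      rw [hcount_self] at this
      exact this
    simp only [Option.getD_some]
    apply le_antisymm
    · -- m ≤ pvW: m is the count of some occurring lca value
      rw [hvals] at hmmem
      obtain ⟨k, hk, rfl⟩ := List.mem_map.1 hmmem
      have hkLg : k ∈ pvLg tree g := (PySem.Set.mem_ofList _ _).1 hk
      obtain ⟨l, hlc, hkl⟩ := List.mem_map.1 hkLg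
      by_cases hkg : k = g
      · rw [hkg, hcount_self]
        exact pv_w_ge_one tree g
      · have hkCg : k ∈ pvChainN tree g := by
          rw [← hkl]
          exact (pv_lcaVal_mem hPre hg hlc).1
        obtain ⟨j, hj, hjk⟩ := List.mem_iff_getElem.1 hkCg
        cases j with
        | zero =>
          exfalso
          rw [pv_chainN_getElem_zero] at hjk
          exact hkg hjk.symm
        | succ i =>
          have hpair := pv_S_pair hPre hg (i := i) hj
          have hmem' : (((pvChainN tree g)[i]'(by omega)), ((pvChainN tree g)[i+1]'hj)) ∈
              (pvChainN tree g).zip (pvChainN tree g).tail :=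
            pv_zip_tail_mem.2 ⟨i, hj, rfl⟩
          have hle := pv_foldl_max_ge_mem
            (fun p => ((pvS tree p.2 : Int) - (pvS tree p.1 : Int)))
            ((pvChainN tree g).zip (pvChainN tree g).tail) 1 _ hmem'
          have hle2 : (pvS tree ((pvChainN tree g)[i+1]'hj) : Int) -
              (pvS tree ((pvChainN tree g)[i]'(by omega)) : Int) ≤ pvW tree g := by
            simpa [pvW] using hle
          rw [hjk] at hpair hle2
          rw [show ((pvLeafKeys tree).map (fun l => pvLcaVal tree g l)) = pvLg tree g from rfl]
            at hpair
          omega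
    · -- pvW ≤ m
      rw [pvW]
      apply pv_foldl_max_le _ _ _ _ h1m
      intro p hp
      obtain ⟨i, hi, rfl⟩ := pv_zip_tail_mem.1 hp
      have hpair := pv_S_pair hPre hg (i := i) hi
      rw [show ((pvLeafKeys tree).map (fun l => pvLcaVal tree g l)) = pvLg tree g from rfl]
        at hpair
      by_cases hc : (pvLg tree g).count ((pvChainN tree g)[i+1]'hi) = 0
      · rw [hc] at hpair
        have hgoal : (pvS tree ((pvChainN tree g)[i+1]'hi) : Int) -
            (pvS tree ((pvChainN tree g)[i]'(by omega)) : Int) ≤ m := by omega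
        simpa using hgoal
      · have hkLg : (pvChainN tree g)[i+1]'hi ∈ pvLg tree g :=
          List.count_pos_iff.1 (Nat.pos_of_ne_zero hc)
        have hkSet : (pvChainN tree g)[i+1]'hi ∈ PySem.Set.ofList (pvLg tree g) :=
          (PySem.Set.mem_ofList _ _).2 hkLg
        have hv : (((pvLg tree g).count ((pvChainN tree g)[i+1]'hi) : Int)) ∈
            (PySem.Dict.counter (pvLg tree g)).values := by
          rw [hvals]
          exact List.mem_map.2 ⟨_, hkSet, rfl⟩
        have hlem := hmax _ hv
        have hgoal : (pvS tree ((pvChainN tree g)[i+1]'hi) : Int) -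
            (pvS tree ((pvChainN tree g)[i]'(by omega)) : Int) ≤ m := by omega
        simpa using hgoal

-- ---------- A: break elimination ----------
theorem pv_inner_frozen (tree : List (String × List String)) (g : String) (bw : Option Int) :
    ∀ (l : List String) (d : PySem.Dict String Int),
    l.foldl (pvBucketsStep tree g bw) (d, true) = (d, true) := by
  intro l
  induction l with
  | nil => intro d; rfl
  | cons x l ih =>
    intro d
    have h1 : pvBucketsStep tree g bw (d, true) x = (d, true) := by
      simp [pvBucketsStep]
    rw [List.foldl_cons, h1]
    exact ih d

-- monotone counts along the no-break fold
theorem pv_modify_fold_getD (tree : List (String × List String)) (g : String)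
    (l : List String) (d : PySem.Dict String Int) (u : String) :
    (l.foldl (fun d leaf => d.modify (pvLca tree g leaf) 0 (· + 1)) d).getD u 0 =
      d.getD u 0 + ((l.map (fun leaf => pvLca tree g leaf)).count u : Int) := by
  have h1 : l.foldl (fun d leaf => d.modify (pvLca tree g leaf) 0 (· + 1)) d =
      (l.map (fun leaf => pvLca tree g leaf)).foldl (fun d x => d.modify x 0 (· + 1)) d := by
    rw [List.foldl_map]
  rw [h1]
  exact PySem.Dict.getD_foldl_modify_add_one _ _ _

theorem pv_inner_cases (tree : List (String × List String)) (g : String) (bw : Option Int) :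
    ∀ (l : List String) (d : PySem.Dict String Int), (∀ u, 0 ≤ d.getD u 0) →
    (l.foldl (pvBucketsStep tree g bw) (d, false) =
      (l.foldl (fun d leaf => d.modify (pvLca tree g leaf) 0 (· + 1)) d, false)) ∨
    (∃ w, bw = some w ∧ (l.foldl (pvBucketsStep tree g bw) (d, false)).2 = true ∧
      ∃ v, 1 ≤ (l.foldl (pvBucketsStep tree g bw) (d, false)).1.getD v 0 ∧
        w ≤ (l.foldl (pvBucketsStep tree g bw) (d, false)).1.getD v 0 ∧
        ∀ u, (l.foldl (pvBucketsStep tree g bw) (d, false)).1.getD u 0 ≤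
          (l.foldl (fun d leaf => d.modify (pvLca tree g leaf) 0 (· + 1)) d).getD u 0) := by
  intro l
  induction l with
  | nil => intro d hd; left; rfl
  | cons leaf l ih =>
    intro d hd
    have hd1 : ∀ u, 0 ≤ (d.modify (pvLca tree g leaf) 0 (· + 1)).getD u 0 := by
      intro u
      rw [PySem.Dict.getD_modify]
      split
      · have := hd (pvLca tree g leaf); omega
      · exact hd u
    cases hbw : bw with
    | none =>
      have hstep : pvBucketsStep tree g none (d, false) leaf =
          (d.modify (pvLca tree g leaf) 0 (· + 1), false) := by
        simp [pvBucketsStep]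
      rw [hbw] at ih
      rw [List.foldl_cons, hstep]
      rcases ih (d.modify (pvLca tree g leaf) 0 (· + 1)) hd1 with h | ⟨w, hw, _⟩
      · left
        rw [h, List.foldl_cons]
      · exact absurd hw (by simp)
    | some w =>
      rw [hbw] at ih
      by_cases hcond : w ≤ d.getD (pvLca tree g leaf) 0 + 1
      · have hstep : pvBucketsStep tree g (some w) (d, false) leaf =
            (d.modify (pvLca tree g leaf) 0 (· + 1), true) := by
          simp only [pvBucketsStep, Bool.false_eq_true, if_false]
          rw [if_pos]
          simp only [decide_eq_true_eq]
          rw [PySem.Dict.getD_modify_self]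
          exact hcond
        rw [List.foldl_cons, hstep, pv_inner_frozen]
        right
        refine ⟨w, rfl, rfl, pvLca tree g leaf, ?_, ?_, ?_⟩
        · rw [PySem.Dict.getD_modify_self]
          have := hd (pvLca tree g leaf)
          omega
        · rw [PySem.Dict.getD_modify_self]
          exact hcond
        · intro u
          rw [List.foldl_cons, pv_modify_fold_getD]
          show (d.modify (pvLca tree g leaf) 0 (· + 1)).getD u 0 ≤ _
          have hnn : (0 : Int) ≤ ((l.map (fun leaf => pvLca tree g leaf)).count u : Int) := by
            positivity
          omega
      · have hstep : pvBucketsStep tree g (some w) (d, false) leaf =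
            (d.modify (pvLca tree g leaf) 0 (· + 1), false) := by
          simp only [pvBucketsStep, Bool.false_eq_true, if_false]
          rw [if_neg]
          simp only [decide_eq_true_eq]
          rw [PySem.Dict.getD_modify_self]
          exact hcond
        rw [List.foldl_cons, hstep]
        rcases ih (d.modify (pvLca tree g leaf) 0 (· + 1)) hd1 with
          h | ⟨w', hw', hbr, v, h1, h2, h3⟩
        · left
          rw [h, List.foldl_cons]
        · right
          have hww : w' = w := (Option.some.inj hw').symm
          subst hww
          refine ⟨w', rfl, hbr, v, h1, h2, ?_⟩
          intro u
          rw [List.foldl_cons]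
          exact h3 u

-- one outer step of A equals the pure argmin step
theorem pv_guess_step_eq {tree : List (String × List String)}
    (hPre : Pre_best_leaf_guess tree) {g : String} (hg : g ∈ pvLeafKeys tree)
    (st : Option String × Option Int) (hst : ∀ w, st.2 = some w → 1 ≤ w) :
    pvGuessStep tree (pvLeafKeys tree) st g = pvStep tree st g := by
  obtain ⟨b1, b2⟩ := st
  have hfull : (pvLeafKeys tree).foldl (fun d leaf => d.modify (pvLca tree g leaf) 0 (· + 1))
      PySem.Dict.empty =
      PySem.Dict.counter ((pvLeafKeys tree).map (fun leaf => pvLca tree g leaf)) := by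
    rw [PySem.Dict.counter_eq_foldl, List.foldl_map]
  have hW := pv_wA_eq_w hPre hg
  rcases pv_inner_cases tree g b2 (pvLeafKeys tree) PySem.Dict.empty
    (by intro u; simp [PySem.Dict.getD_empty]) with hpure | ⟨w, hw, hbr, v, h1, h2, h3⟩
  · -- no break: the buckets dict is the full counter
    rw [pvGuessStep, pvStep]
    simp only
    rw [hpure]
    simp only
    rw [hfull, hW]
    cases b2 with
    | none => simp
    | some bw => simp
  · -- break happened: neither side updates
    subst hw
    have hwv := hst w rfl
    have hmax1 :
        ((pvLeafKeys tree).foldl (pvBucketsStep tree g (some w))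
          (PySem.Dict.empty, false)).1.getD v 0 ≤
        ((PySem.List.max? ((pvLeafKeys tree).foldl (pvBucketsStep tree g (some w))
          (PySem.Dict.empty, false)).1.values (fun x => x))).getD 0 :=
      pv_max_values_ge (by omega)
    have hfull_ge1 : (1 : Int) ≤
        ((pvLeafKeys tree).foldl (fun d leaf => d.modify (pvLca tree g leaf) 0 (· + 1))
          PySem.Dict.empty).getD v 0 := le_trans h1 (h3 v)
    have hx := pv_max_values_ge hfull_ge1
    rw [hfull, hW] at hx
    have h3' := h3 v
    rw [hfull] at h3'
    have hpvW_ge : w ≤ pvW tree g := by omega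
    rw [pvGuessStep, pvStep]
    simp only
    rw [if_neg (by simp only [decide_eq_true_eq]; omega)]
    rw [if_neg (by omega)]

-- ---------- A's candidate list is B's ----------
theorem pv_lookup_self {tree : List (String × List String)} (hnd : (tree.map Prod.fst).Nodup)
    {pc : String × List String} (hpc : pc ∈ tree) : tree.lookup pc.1 = some pc.2 := by
  induction tree with
  | nil => simp at hpc
  | cons qc t ih =>
    rcases List.mem_cons.1 hpc with rfl | hpc
    · simp [List.lookup]
    · have hne : pc.1 ≠ qc.1 := by
        intro he
        have hmem : pc.1 ∈ t.map Prod.fst := List.mem_map.2 ⟨pc, hpc, rfl⟩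
        rw [he] at hmem
        exact (List.nodup_cons.1 (by simpa using hnd)).1 hmem
      have hb : (pc.1 == qc.1) = false := by simpa using hne
      show (match pc.1 == qc.1 with
        | true => some qc.2
        | false => List.lookup pc.1 t) = some pc.2
      rw [hb]
      exact ih (List.nodup_cons.1 (by simpa using hnd)).2 hpc

theorem pv_cand_eq {tree : List (String × List String)} (hnd : (tree.map Prod.fst).Nodup) :
    (tree.map Prod.fst).filter (fun node => pvIsLeaf tree node) = pvLeafKeys tree := by
  rw [List.filter_map, pvLeafKeys]
  congr 1
  apply List.filter_congr
  intro pc hpc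
  simp only [Function.comp_apply, pvIsLeaf, pv_lookup_self hnd hpc, Option.getD_some]

-- ---------- B reductions ----------
theorem pv_tally_chains (tree : List (String × List String)) :
    ∀ (l : List String) (d1 : PySem.Dict String Int) (d2 : PySem.Dict String (List String))
      (x : String),
    ((l.foldl (pvTallyStep (tree.length + 1) (pvBuildParentMap tree)) (d1, d2)).2).get? x =
      if x ∈ l then some (pvChainN tree x) else d2.get? x := by
  intro l
  induction l with
  | nil => intro d1 d2 x; simp
  | cons leaf l ih =>
    intro d1 d2 x
    rw [List.foldl_cons]
    show ((l.foldl _ (_, d2.insert leaf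
      (pvChain (tree.length + 1) (pvBuildParentMap tree) leaf))).2).get? x = _
    rw [ih]
    by_cases hx : x ∈ l
    · simp [hx]
    · simp only [hx, if_false, List.mem_cons]
      rw [PySem.Dict.get?_insert]
      by_cases he : x = leaf <;> simp [he, pvChainN]

theorem pv_tally_cnt (tree : List (String × List String)) :
    ∀ (l : List String) (d1 : PySem.Dict String Int) (d2 : PySem.Dict String (List String))
      (v : String),
    ((l.foldl (pvTallyStep (tree.length + 1) (pvBuildParentMap tree)) (d1, d2)).1).getD v 0 =
      d1.getD v 0 + ((l.map (fun leaf => ((pvChainN tree leaf).count v : Int))).sum) := by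
  intro l
  induction l with
  | nil => intro d1 d2 v; simp
  | cons leaf l ih =>
    intro d1 d2 v
    rw [List.foldl_cons]
    show ((l.foldl _ ((pvChain (tree.length + 1) (pvBuildParentMap tree) leaf).foldl
      (fun d node => d.insert node (d.getD node 0 + 1)) d1, _)).1).getD v 0 = _
    rw [ih]
    rw [PySem.Dict.getD_foldl_insert_add_one]
    show d1.getD v 0 + ((pvChainN tree leaf).count v : Int) + _ = _
    simp only [List.map_cons, List.sum_cons]
    ring

theorem pv_chain_count_cast {tree : List (String × List String)} {x v : String}
    (hx : pvGrounded tree x) :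
    (((pvChainN tree x).count v : Int)) = if v ∈ pvChainN tree x then 1 else 0 := by
  by_cases h : v ∈ pvChainN tree x
  · rw [if_pos h]
    have := List.count_eq_one_of_mem
      (pv_chain_nodup hx (by have := pv_depth_le hx; omega)) h
    exact_mod_cast this
  · rw [if_neg h]
    have : (pvChainN tree x).count v = 0 := by
      rw [List.count_eq_zero]; exact h
    exact_mod_cast this

theorem pv_sum_count {tree : List (String × List String)} (v : String) :
    ∀ (l : List String), (∀ x ∈ l, pvGrounded tree x) →
    ((l.map (fun leaf => ((pvChainN tree leaf).count v : Int))).sum) =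
      ((l.countP (fun leaf => decide (v ∈ pvChainN tree leaf)) : Nat) : Int) := by
  intro l
  induction l with
  | nil => intro _; simp
  | cons x l ih =>
    intro hl
    simp only [List.map_cons, List.sum_cons, List.countP_cons]
    rw [pv_chain_count_cast (hl x List.mem_cons_self),
      ih (fun y hy => hl y (List.mem_cons_of_mem x hy))]
    by_cases h : v ∈ pvChainN tree x <;> simp [h] <;> omega

theorem pv_cnt_eq_S {tree : List (String × List String)} (hPre : Pre_best_leaf_guess tree)
    (v : String) :
    (((pvLeafKeys tree).foldl (pvTallyStep (tree.length + 1) (pvBuildParentMap tree))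
      (PySem.Dict.empty, PySem.Dict.empty)).1).getD v 0 = (pvS tree v : Int) := by
  rw [pv_tally_cnt]
  rw [PySem.Dict.getD_empty, zero_add]
  rw [pv_sum_count v (pvLeafKeys tree) (fun x hx => hPre.2.1 x hx)]
  rfl

theorem pv_best_step_eq {tree : List (String × List String)} (hPre : Pre_best_leaf_guess tree)
    {g : String} (hg : g ∈ pvLeafKeys tree) (st : Option String × Option Int) :
    pvBestStep
      (((pvLeafKeys tree).foldl (pvTallyStep (tree.length + 1) (pvBuildParentMap tree))
        (PySem.Dict.empty, PySem.Dict.empty)).1)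
      (((pvLeafKeys tree).foldl (pvTallyStep (tree.length + 1) (pvBuildParentMap tree))
        (PySem.Dict.empty, PySem.Dict.empty)).2) st g = pvStep tree st g := by
  have hch : (((pvLeafKeys tree).foldl (pvTallyStep (tree.length + 1) (pvBuildParentMap tree))
      (PySem.Dict.empty, PySem.Dict.empty)).2).getD g [] = pvChainN tree g := by
    rw [PySem.Dict.getD_eq_get?_getD, pv_tally_chains]
    simp [hg]
  rw [pvBestStep, pvStep]
  simp only [hch, pv_cnt_eq_S hPre]
  rfl

-- ---------- outer folds ----------
theorem pv_outer_A {tree : List (String × List String)} (hPre : Pre_best_leaf_guess tree) :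
    ∀ (l : List String), (∀ g ∈ l, g ∈ pvLeafKeys tree) →
    ∀ (st : Option String × Option Int), (∀ w, st.2 = some w → 1 ≤ w) →
    l.foldl (pvGuessStep tree (pvLeafKeys tree)) st = l.foldl (pvStep tree) st := by
  intro l
  induction l with
  | nil => intro _ st _; rfl
  | cons g l ih =>
    intro hsub st hst
    simp only [List.foldl_cons]
    rw [pv_guess_step_eq hPre (hsub g List.mem_cons_self) st hst]
    apply ih (fun x hx => hsub x (List.mem_cons_of_mem g hx))
    intro w hw
    rcases hst2 : st.2 with _ | bw <;> simp only [pvStep, hst2] at hw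
    · rw [← Option.some.inj hw]
      exact pv_w_ge_one tree g
    · split at hw
      · rw [← Option.some.inj hw]
        exact pv_w_ge_one tree g
      · exact hst w hw

theorem pv_outer_B {tree : List (String × List String)} (hPre : Pre_best_leaf_guess tree) :
    ∀ (l : List String), (∀ g ∈ l, g ∈ pvLeafKeys tree) →
    ∀ (st : Option String × Option Int),
    l.foldl (pvBestStep
      (((pvLeafKeys tree).foldl (pvTallyStep (tree.length + 1) (pvBuildParentMap tree))
        (PySem.Dict.empty, PySem.Dict.empty)).1)
      (((pvLeafKeys tree).foldl (pvTallyStep (tree.length + 1) (pvBuildParentMap tree))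
        (PySem.Dict.empty, PySem.Dict.empty)).2)) st = l.foldl (pvStep tree) st := by
  intro l
  induction l with
  | nil => intro _ st; rfl
  | cons g l ih =>
    intro hsub st
    simp only [List.foldl_cons]
    rw [pv_best_step_eq hPre (hsub g List.mem_cons_self) st]
    exact ih (fun x hx => hsub x (List.mem_cons_of_mem g hx)) _

-- ===== VERDICT (by name: the statement is the Claim_ definition above) =====
theorem best_leaf_guess_spec : Claim_equal_best_leaf_guess := by
  intro tree _hDom hPre
  unfold Spec_best_leaf_guess
  show best_leaf_guess tree = best_leaf_guess_alt tree
  simp only [best_leaf_guess, best_leaf_guess_alt]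
  rw [pv_cand_eq hPre.1]
  rw [show (tree.filter (fun pc => pc.2.isEmpty)).map Prod.fst = pvLeafKeys tree from rfl]
  rw [pv_outer_A hPre (pvLeafKeys tree) (fun g hg => hg) (none, none) (by simp)]
  rw [pv_outer_B hPre (pvLeafKeys tree) (fun g hg => hg) (none, none)]
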